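-- pv_equiv track=rewrite | github.com/assem-ch/academic_projects | new/codility/basic_test/1.py | solution
-- ===== SOURCE A (Python) =====
-- def solution(A):
--     i = 0
--     j = 0
--     L = len(A)
--     visited = set()
--     while(0 <= i < L): #fix limit
--         if i in visited:
--             return -1
--         visited.add(i)
--         j += 1
--         i += A[i]
--     return j
-- ===== SOURCE B (Python) =====
-- def solution(A):
--     L = len(A)
--     i, j = 0, 0
--     for _ in range(L + 1):
--         if 0 <= i < L:
--             j += 1
--             i += A[i]
--     return j if not (0 <= i < L) else -1
-- ===== Notes on version B (the rewrite author's own statement) =====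
-- stated objective: alternative
-- what changed: Replaces the visited-set while-loop with a fixed-trip-count for-loop over range(len(A)+1) whose body only advances when in range (no early exit, no set); by pigeonhole, still being in range after len(A)+1 chances means a cycle, so the final in-range test decides -1 vs the jump count.
import Mathlib
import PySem

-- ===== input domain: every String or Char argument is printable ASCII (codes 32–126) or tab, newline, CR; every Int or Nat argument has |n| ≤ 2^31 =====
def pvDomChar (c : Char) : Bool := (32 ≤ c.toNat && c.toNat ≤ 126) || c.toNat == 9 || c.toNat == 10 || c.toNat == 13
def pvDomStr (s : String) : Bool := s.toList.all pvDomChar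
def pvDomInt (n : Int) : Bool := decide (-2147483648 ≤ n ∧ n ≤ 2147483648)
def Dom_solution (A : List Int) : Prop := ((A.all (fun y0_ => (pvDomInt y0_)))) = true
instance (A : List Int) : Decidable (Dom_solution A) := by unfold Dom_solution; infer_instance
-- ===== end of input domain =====

-- B replaces A's visited-set while-loop by a fixed-trip-count for-loop (len(A)+1 rounds) that only
-- advances while in range; still in range at the end means a cycle by pigeonhole, so return -1 then.

-- ===== PORT A =====
-- fuel = A.length + 2 bounds A's while loop: each iteration adds a fresh in-range index to visited.
def solutionGo (A : List Int) (fuel : Nat) (i j : Int) (visited : PySem.Set Int) : Int :=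
  match fuel with
  | 0 => j
  | f + 1 =>
    if 0 ≤ i ∧ i < (A.length : Int) then
      if PySem.Set.contains visited i then -1
      else solutionGo A f (i + PySem.List.pyGetD A i 0) (j + 1) (PySem.Set.add visited i)
    else j

def solution (A : List Int) : Int :=
  solutionGo A (A.length + 2) 0 0 PySem.Set.empty

-- ===== PORT B =====
-- loop body of B's for-loop: advance (i, j) only when i is in range; the range index is unused.
def altBody (A : List Int) (s : Int × Int) (_n : Nat) : Int × Int :=
  if 0 ≤ s.1 ∧ s.1 < (A.length : Int) then (s.1 + PySem.List.pyGetD A s.1 0, s.2 + 1) else s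

def solution_alt (A : List Int) : Int :=
  let s := (List.range (A.length + 1)).foldl (altBody A) (0, 0)
  if ¬ (0 ≤ s.1 ∧ s.1 < (A.length : Int)) then s.2 else -1

-- ===== PRECONDITION & SPEC =====
def Spec_solution (A : List Int) (out : Int) : Prop := out = solution_alt A
instance (A : List Int) (out : Int) : Decidable (Spec_solution A out) := by unfold Spec_solution; infer_instance

-- ===== CLAIM (what is proved, stated in full; the proofs are below) =====
def Claim_equal_solution : Prop := ∀ (A : List Int), Dom_solution A → Spec_solution A (solution A)

-- ===== LEMMAS AND PROOFS =====

-- the jump trajectory i_0 = 0, i_{n+1} = i_n + A[i_n]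
def traj (A : List Int) : Nat → Int
  | 0 => 0
  | n + 1 => traj A n + PySem.List.pyGetD A (traj A n) 0

abbrev inR (A : List Int) (i : Int) : Prop := 0 ≤ i ∧ i < (A.length : Int)

-- the visited set after k iterations of A's loop
def Vset (A : List Int) : Nat → PySem.Set Int
  | 0 => PySem.Set.empty
  | k + 1 => PySem.Set.add (Vset A k) (traj A k)

-- the loop stops producing fresh in-range indices at step k
def stopP (A : List Int) (k : Nat) : Prop :=
  ¬ inR A (traj A k) ∨ ∃ a < k, traj A k = traj A a

lemma mem_Vset (A : List Int) (k : Nat) (x : Int) :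
    x ∈ Vset A k ↔ ∃ m < k, x = traj A m := by
  induction k with
  | zero => simp [Vset, PySem.Set.empty]
  | succ k ih =>
    simp only [Vset, PySem.Set.mem_add, ih]
    constructor
    · rintro (⟨m, hm, rfl⟩ | rfl)
      · exact ⟨m, by omega, rfl⟩
      · exact ⟨k, by omega, rfl⟩
    · rintro ⟨m, hm, rfl⟩
      rcases Nat.lt_succ_iff_lt_or_eq.mp hm with h | rfl
      · exact Or.inl ⟨m, h, rfl⟩
      · exact Or.inr rfl

lemma traj_shift (A : List Int) (a b : Nat) (h : traj A a = traj A b) :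
    ∀ t, traj A (a + t) = traj A (b + t) := by
  intro t
  induction t with
  | zero => simpa using h
  | succ t ih =>
    show traj A ((a + t) + 1) = traj A ((b + t) + 1)
    simp only [traj, ih]

-- pigeonhole: within the first len(A)+1 steps the trajectory leaves the range or repeats
lemma exists_stop (A : List Int) : ∃ k, k ≤ A.length ∧ stopP A k := by
  by_contra h
  push_neg at h
  have hgood : ∀ k, k ≤ A.length → inR A (traj A k) ∧ ∀ a < k, traj A k ≠ traj A a := by
    intro k hk
    have := h k hk
    unfold stopP at this
    push_neg at this
    exact this
  set l : List Int := (List.range (A.length + 1)).map (traj A) with hl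
  have hnd : l.Nodup := by
    refine List.Nodup.map_on ?_ List.nodup_range
    intro x hx y hy hxy
    simp only [List.mem_range] at hx hy
    by_contra hne
    rcases Nat.lt_or_ge x y with hlt | hge
    · exact (hgood y (by omega)).2 x hlt hxy.symm
    · have hlt : y < x := by omega
      exact (hgood x (by omega)).2 y hlt hxy
  have hsub : l.toFinset ⊆ Finset.Ico (0 : Int) (A.length : Int) := by
    intro x hx
    simp only [List.mem_toFinset, hl, List.mem_map, List.mem_range] at hx
    rcases hx with ⟨m, hm, rfl⟩
    have := (hgood m (by omega)).1
    simpa [Finset.mem_Ico] using this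
  have hcard : l.toFinset.card = A.length + 1 := by
    rw [List.toFinset_card_of_nodup hnd, hl, List.length_map, List.length_range]
  have hle := Finset.card_le_card hsub
  rw [hcard, Int.card_Ico] at hle
  omega

-- A's loop run from step k (with k + d = kst, the first stop step): returns -1 on a repeat, j on exit
lemma runA (A : List Int) (kst : Nat) (hmin : ∀ m < kst, ¬ stopP A m) (hstop : stopP A kst) :
    ∀ d k fuel, k + d = kst → d < fuel →
      solutionGo A fuel (traj A k) (k : Int) (Vset A k) =
        (if inR A (traj A kst) then -1 else (kst : Int)) := by
  intro d
  induction d with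
  | zero =>
    intro k fuel hk hfuel
    obtain ⟨f, rfl⟩ : ∃ f, fuel = f + 1 := ⟨fuel - 1, by omega⟩
    subst hk
    simp only [Nat.add_zero]
    by_cases hin : inR A (traj A k)
    · have hrep : ∃ a < k, traj A k = traj A a := by
        rcases hstop with h | h
        · exact absurd hin h
        · exact h
      have hmem : traj A k ∈ Vset A k := by
        rw [mem_Vset]
        rcases hrep with ⟨a, ha, he⟩
        exact ⟨a, ha, he⟩
      simp only [solutionGo]
      rw [if_pos hin, if_pos ((PySem.Set.contains_iff _ _).mpr hmem), if_pos hin]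
    · simp only [solutionGo]
      rw [if_neg hin, if_neg hin]
  | succ d ih =>
    intro k fuel hk hfuel
    obtain ⟨f, rfl⟩ : ∃ f, fuel = f + 1 := ⟨fuel - 1, by omega⟩
    have hns := hmin k (by omega)
    unfold stopP at hns
    push_neg at hns
    obtain ⟨hin, hfresh⟩ := hns
    have hnmem : traj A k ∉ Vset A k := by
      rw [mem_Vset]
      rintro ⟨m, hm, he⟩
      exact hfresh m hm he
    have hnc : ¬ (PySem.Set.contains (Vset A k) (traj A k) = true) := by
      intro h
      exact hnmem ((PySem.Set.contains_iff _ _).mp h)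
    have hrec := ih (k + 1) f (by omega) (by omega)
    simp only [solutionGo]
    rw [if_pos hin, if_neg hnc]
    have h1 : traj A k + PySem.List.pyGetD A (traj A k) 0 = traj A (k + 1) := rfl
    have h2 : ((k : Int) + 1) = ((k + 1 : Nat) : Int) := by push_cast; ring
    have h3 : PySem.Set.add (Vset A k) (traj A k) = Vset A (k + 1) := rfl
    rw [h1, h2, h3, hrec]

-- if the trajectory repeats then it stays in range forever
lemma all_inR_of_repeat (A : List Int) (kst : Nat) (hmin : ∀ m < kst, ¬ stopP A m)
    (hin : inR A (traj A kst)) (hrep : ∃ a < kst, traj A kst = traj A a) :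
    ∀ n, inR A (traj A n) := by
  obtain ⟨a, ha, he⟩ := hrep
  have key : ∀ n, ∃ m, m ≤ kst ∧ traj A n = traj A m := by
    intro n
    induction n using Nat.strongRecOn with
    | ind n ih =>
      rcases Nat.lt_or_ge n kst with h | h
      · exact ⟨n, by omega, rfl⟩
      · rcases Nat.eq_or_lt_of_le h with h' | h'
        · exact ⟨n, by omega, rfl⟩
        · have ht : n = kst + (n - kst) := by omega
          have hshift := traj_shift A kst a he (n - kst)
          rcases ih (a + (n - kst)) (by omega) with ⟨m, hm, he2⟩
          exact ⟨m, hm, by rw [ht, hshift, he2]⟩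
  intro n
  rcases key n with ⟨m, hm, he2⟩
  rw [he2]
  rcases Nat.eq_or_lt_of_le hm with rfl | hlt
  · exact hin
  · have := hmin m hlt
    unfold stopP at this
    push_neg at this
    exact this.1

-- B's fold over range n, characterized by the trajectory: with e the first exit step (or none),
-- the state after n rounds is (traj (min n e), min n e)
lemma foldB_exit (A : List Int) (kst : Nat) (hmin : ∀ m < kst, ¬ stopP A m)
    (hout : ¬ inR A (traj A kst)) :
    ∀ n, (List.range n).foldl (altBody A) (0, 0) =
      (traj A (min n kst), ((min n kst : Nat) : Int)) := by
  intro n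
  induction n with
  | zero => simp [traj]
  | succ n ih =>
    rw [List.range_succ, List.foldl_append, ih]
    simp only [List.foldl_cons, List.foldl_nil]
    rcases Nat.lt_or_ge n kst with h | h
    · have hin : inR A (traj A n) := by
        have := hmin n h
        unfold stopP at this
        push_neg at this
        exact this.1
      rw [Nat.min_eq_left (le_of_lt h)] at *
      unfold altBody
      rw [if_pos hin]
      have hm : min (n + 1) kst = n + 1 := Nat.min_eq_left h
      rw [hm]
      have h1 : traj A n + PySem.List.pyGetD A (traj A n) 0 = traj A (n + 1) := rfl
      simp only [h1]
      push_cast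
      ring_nf
    · have hm1 : min n kst = kst := Nat.min_eq_right h
      have hm2 : min (n + 1) kst = kst := Nat.min_eq_right (by omega)
      rw [hm1, hm2]
      unfold altBody
      rw [if_neg hout]

-- B's fold when the trajectory never exits
lemma foldB_all (A : List Int) (hall : ∀ n, inR A (traj A n)) :
    ∀ n, (List.range n).foldl (altBody A) (0, 0) = (traj A n, (n : Int)) := by
  intro n
  induction n with
  | zero => simp [traj]
  | succ n ih =>
    rw [List.range_succ, List.foldl_append, ih]
    simp only [List.foldl_cons, List.foldl_nil]
    unfold altBody
    rw [if_pos (hall n)]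
    have h1 : traj A n + PySem.List.pyGetD A (traj A n) 0 = traj A (n + 1) := rfl
    simp only [h1]
    push_cast
    ring_nf

-- ===== VERDICT (by name: the statement is the Claim_ definition above) =====
theorem solution_spec : Claim_equal_solution := by
  intro A _
  unfold Spec_solution solution solution_alt
  obtain ⟨k0, hk0, hstop0⟩ := exists_stop A
  haveI : DecidablePred (stopP A) := fun k => Classical.dec _
  have hex : ∃ k, stopP A k := ⟨k0, hstop0⟩
  set kst := Nat.find hex with hkst
  have hstop : stopP A kst := Nat.find_spec hex
  have hmin : ∀ m < kst, ¬ stopP A m := fun m hm => Nat.find_min hex hm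
  have hle : kst ≤ A.length := le_trans (Nat.find_min' hex hstop0) hk0
  have hA := runA A kst hmin hstop kst 0 (A.length + 2) (by omega) (by omega)
  by_cases hin : inR A (traj A kst)
  · have hrep : ∃ a < kst, traj A kst = traj A a := by
      rcases hstop with h | h
      · exact absurd hin h
      · exact h
    have hall := all_inR_of_repeat A kst hmin hin hrep
    have hB := foldB_all A hall (A.length + 1)
    rw [if_pos hin] at hA
    simp only [hB]
    rw [if_neg (by simpa using hall (A.length + 1))]
    exact hA
  · have hB := foldB_exit A kst hmin hin (A.length + 1)
    have hm : min (A.length + 1) kst = kst := Nat.min_eq_right (by omega)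
    rw [if_neg hin] at hA
    simp only [hB, hm]
    rw [if_pos (by simpa using hin)]
    exact hA
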